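-- pv_equiv track=rewrite | github.com/hgbrian/foldism | backends/chai1.py | _parse_a3m_with_headers
-- ===== SOURCE A (Python) =====
-- def _parse_a3m_with_headers(content: str) -> list[tuple[str, str]]:
--     """Parse A3M file into (header, sequence) tuples. Skips query. Strips lowercase."""
--     results: list[tuple[str, str]] = []
--     current_header = ""
--     current_seq_lines: list[str] = []
--     is_first = True
--
--     for line in content.splitlines():
--         if line.startswith("#"):
--             continue
--         if line.startswith(">"):
--             if current_seq_lines:
--                 seq = "".join(current_seq_lines)
--                 seq = "".join(c for c in seq if not c.islower())
--                 if is_first: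
--                     is_first = False
--                 else:
--                     results.append((current_header, seq))
--             current_header = line[1:].strip()
--             current_seq_lines = []
--         else:
--             current_seq_lines.append(line.strip())
--
--     if current_seq_lines:
--         seq = "".join(current_seq_lines)
--         seq = "".join(c for c in seq if not c.islower())
--         if not is_first:
--             results.append((current_header, seq))
--
--     return results
-- ===== SOURCE B (Python) =====
-- def _parse_a3m_with_headers(content: str) -> list[tuple[str, str]]:
--     """Span-based two-stage parse: filter comment lines away, then repeatedly
--     scan the next body span and the header that follows it (no per-line state
--     machine, no is_first flag); finally drop the first block (the query) and
--     strip lowercase from the remaining bodies."""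
--     lines = [l for l in content.splitlines() if not l.startswith("#")]
--     blocks: list[tuple[str, str]] = []
--     header = ""
--     rest = lines
--     while True:
--         i = 0
--         while i < len(rest) and not rest[i].startswith(">"):
--             i += 1
--         if i > 0:
--             blocks.append((header, "".join(l.strip() for l in rest[:i])))
--         if i == len(rest):
--             break
--         header = rest[i][1:].strip()
--         rest = rest[i + 1:]
--     return [(h, "".join(c for c in b if not c.islower())) for h, b in blocks[1:]]
-- ===== Notes on version B (the rewrite author's own statement) =====
-- stated objective: alternative
-- what changed: A is a per-line state machine carrying current_header, pending body lines and an is_first flag with flush logic duplicated at headers and at EOF; B first filters comment lines out, then repeatedly scans the next whole body span and the header following it (no per-line state, no is_first flag), and finally drops the first block and strips lowercase in one comprehension.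
import Mathlib
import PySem

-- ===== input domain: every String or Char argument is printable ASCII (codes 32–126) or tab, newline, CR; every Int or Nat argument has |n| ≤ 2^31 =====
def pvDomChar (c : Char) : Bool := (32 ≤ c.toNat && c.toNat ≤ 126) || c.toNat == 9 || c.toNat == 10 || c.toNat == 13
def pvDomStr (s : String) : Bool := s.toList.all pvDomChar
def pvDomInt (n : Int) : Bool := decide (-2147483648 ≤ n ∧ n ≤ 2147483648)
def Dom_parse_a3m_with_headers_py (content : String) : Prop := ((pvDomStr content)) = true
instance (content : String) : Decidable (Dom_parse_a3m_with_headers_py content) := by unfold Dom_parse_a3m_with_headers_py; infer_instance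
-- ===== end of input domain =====

-- B replaces A's per-line state machine (is_first flag, pending header/body) by a two-stage
-- span scan: filter comments, repeatedly take the next body span and the header after it,
-- then drop the first block and strip lowercase — same cost, different decomposition.

-- ===== PORT A =====
-- one fold step = one iteration of A's for-loop; state = (results, current_header, current_seq_lines, is_first)
def pvStepA (st : List (String × String) × String × List String × Bool) (line : String) :
    List (String × String) × String × List String × Bool :=
  match st with
  | (results, current_header, current_seq_lines, is_first) =>
    if PySem.Str.startswith line "#" then (results, current_header, current_seq_lines, is_first)
    else if PySem.Str.startswith line ">" then
      if current_seq_lines ≠ [] then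
        let seq := PySem.Str.join "" current_seq_lines
        -- "".join(c for c in seq if not c.islower()) — hand port of the genexpr, exact on Dom's ASCII
        let seq := String.ofList (seq.toList.filter (fun c => !(PySem.Chars.islower c)))
        if is_first then
          (results, PySem.Str.strip (PySem.Str.slice line (some 1) none), [], false)
        else
          (results ++ [(current_header, seq)],
           PySem.Str.strip (PySem.Str.slice line (some 1) none), [], false)
      else
        (results, PySem.Str.strip (PySem.Str.slice line (some 1) none), [], is_first)
    else
      (results, current_header, current_seq_lines ++ [PySem.Str.strip line], is_first)

def parse_a3m_with_headers_py (content : String) : List (String × String) :=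
  let fin := (PySem.Str.splitlines content).foldl pvStepA ([], "", [], true)
  if fin.2.2.1 ≠ [] then
    let seq := PySem.Str.join "" fin.2.2.1
    let seq := String.ofList (seq.toList.filter (fun c => !(PySem.Chars.islower c)))
    if !fin.2.2.2 then fin.1 ++ [(fin.2.1, seq)] else fin.1
  else fin.1

-- ===== PORT B =====
-- B's while-loop, ported as the obvious tail recursion on the remaining line list `rest`
-- with the accumulated `blocks`; the inner index scan `i` and the slices rest[:i] / rest[i+1:]
-- (i = index of the first '>' line) are exactly takeWhile / tail-of-dropWhile.
def pvScan (rest : List String) (header : String) (blocks : List (String × String)) :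
    List (String × String) :=
  let body := rest.takeWhile (fun l => !(PySem.Str.startswith l ">"))
  let blocks' := if body ≠ [] then
      blocks ++ [(header, PySem.Str.join "" (body.map PySem.Str.strip))] else blocks
  match hdw : rest.dropWhile (fun l => !(PySem.Str.startswith l ">")) with
  | [] => blocks'
  | l :: tl => pvScan tl (PySem.Str.strip (PySem.Str.slice l (some 1) none)) blocks'
termination_by rest.length
decreasing_by
  have hle := List.length_dropWhile_le (p := fun l => !(PySem.Str.startswith l ">")) (l := rest)
  rw [hdw] at hle; simp at hle; omega

def parse_a3m_with_headers_py_alt (content : String) : List (String × String) :=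
  let lines := (PySem.Str.splitlines content).filter (fun l => !(PySem.Str.startswith l "#"))
  ((pvScan lines "" []).drop 1).map
    (fun hb => (hb.1, String.ofList (hb.2.toList.filter (fun c => !(PySem.Chars.islower c)))))

-- ===== PRECONDITION & SPEC =====
def Spec_parse_a3m_with_headers_py (content : String) (out : List (String × String)) : Prop := out = parse_a3m_with_headers_py_alt content
instance (content : String) (out : List (String × String)) : Decidable (Spec_parse_a3m_with_headers_py content out) := by unfold Spec_parse_a3m_with_headers_py; infer_instance

-- ===== CLAIM (what is proved, stated in full; the proofs are below) =====
def Claim_equal_parse_a3m_with_headers_py : Prop := ∀ (content : String), Dom_parse_a3m_with_headers_py content → Spec_parse_a3m_with_headers_py content (parse_a3m_with_headers_py content)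

-- ===== LEMMAS AND PROOFS =====

-- lowercase-stripping postprocessing of one block
def pvProc (p : String × String) : String × String :=
  (p.1, String.ofList (p.2.toList.filter (fun c => !(PySem.Chars.islower c))))

-- reference block list: all (header, joined stripped body) blocks with ≥ 1 body line
def pvBlocks : List String → String → List String → List (String × String)
  | [], h, ls => if ls ≠ [] then [(h, PySem.Str.join "" ls)] else []
  | l :: rest, h, ls =>
    if PySem.Str.startswith l "#" then pvBlocks rest h ls
    else if PySem.Str.startswith l ">" then
      (if ls ≠ [] then [(h, PySem.Str.join "" ls)] else []) ++
        pvBlocks rest (PySem.Str.strip (PySem.Str.slice l (some 1) none)) []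
    else pvBlocks rest h (ls ++ [PySem.Str.strip l])

-- A's trailing flush, as a function of the final fold state
def pvAFin (st : List (String × String) × String × List String × Bool) : List (String × String) :=
  if st.2.2.1 ≠ [] then
    let seq := PySem.Str.join "" st.2.2.1
    let seq := String.ofList (seq.toList.filter (fun c => !(PySem.Chars.islower c)))
    if !st.2.2.2 then st.1 ++ [(st.2.1, seq)] else st.1
  else st.1

-- the two line predicates in simp-normal (Chars) form
lemma pvPredGt : (fun l => !(PySem.Str.startswith l ">"))
    = (fun l : String => !(PySem.Chars.startswith l.toList ['>'])) := by
  funext l; simp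

lemma pvPredHash : (fun l => !(PySem.Str.startswith l "#"))
    = (fun l : String => !(PySem.Chars.startswith l.toList ['#'])) := by
  funext l; simp

-- A's fold invariant: finished A-result = emitted blocks ++ postprocessed remaining blocks,
-- skipping the first remaining block iff is_first is still set
lemma pvAInv (lines : List String) :
    ∀ (res : List (String × String)) (h : String) (ls : List String) (first : Bool),
    pvAFin (lines.foldl pvStepA (res, h, ls, first))
      = res ++ ((pvBlocks lines h ls).drop (if first then 1 else 0)).map pvProc := by
  induction lines with
  | nil =>
    intro res h ls first
    by_cases hls : ls = []
    · simp [pvAFin, pvBlocks, hls]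
    · cases first <;> simp [pvAFin, pvBlocks, hls, pvProc]
  | cons l rest ih =>
    intro res h ls first
    simp only [List.foldl_cons]
    by_cases h1 : PySem.Chars.startswith l.toList ['#'] = true
    · rw [show pvStepA (res, h, ls, first) l = (res, h, ls, first) by simp [pvStepA, h1]]
      rw [ih, pvBlocks]
      simp [h1]
    · by_cases h2 : PySem.Chars.startswith l.toList ['>'] = true
      · by_cases hls : ls = []
        · subst hls
          rw [show pvStepA (res, h, [], first) l
              = (res, PySem.Str.strip (PySem.Str.slice l (some 1) none), [], first) by
            simp [pvStepA, h1, h2]]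
          rw [ih, pvBlocks]
          simp [h1, h2]
        · cases first
          · rw [show pvStepA (res, h, ls, false) l
                = (res ++ [pvProc (h, PySem.Str.join "" ls)],
                   PySem.Str.strip (PySem.Str.slice l (some 1) none), [], false) by
              simp [pvStepA, h1, h2, hls, pvProc]]
            rw [ih, pvBlocks]
            simp [h1, h2, hls]
          · rw [show pvStepA (res, h, ls, true) l
                = (res, PySem.Str.strip (PySem.Str.slice l (some 1) none), [], false) by
              simp [pvStepA, h1, h2, hls]]
            rw [ih, pvBlocks]
            simp [h1, h2, hls]
      · rw [show pvStepA (res, h, ls, first) l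
            = (res, h, ls ++ [PySem.Str.strip l], first) by simp [pvStepA, h1, h2]]
        rw [ih, pvBlocks]
        simp [h1, h2]

-- comment lines may be filtered away up front
lemma pvBlocksFilter (lines : List String) :
    ∀ (h : String) (ls : List String),
    pvBlocks (lines.filter (fun l => !(PySem.Chars.startswith l.toList ['#']))) h ls
      = pvBlocks lines h ls := by
  induction lines with
  | nil => intro h ls; rfl
  | cons l rest ih =>
    intro h ls
    by_cases h1 : PySem.Chars.startswith l.toList ['#'] = true
    · rw [show (l :: rest).filter (fun l => !(PySem.Chars.startswith l.toList ['#']))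
          = rest.filter (fun l => !(PySem.Chars.startswith l.toList ['#'])) by
        simp [h1]]
      rw [ih, pvBlocks]
      simp [h1]
    · rw [show (l :: rest).filter (fun l => !(PySem.Chars.startswith l.toList ['#']))
          = l :: rest.filter (fun l => !(PySem.Chars.startswith l.toList ['#'])) by
        simp [h1]]
      rw [pvBlocks, pvBlocks]
      by_cases h2 : PySem.Chars.startswith l.toList ['>'] = true <;> simp [h1, h2, ih]

-- one unfolded step of pvScan, with the predicates in Chars form
lemma pvShapeScan (lines : List String) (h : String) (acc : List (String × String)) :
    (let body := ([] : List String)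
        ++ (lines.takeWhile (fun l => !(PySem.Chars.startswith l.toList ['>']))).map PySem.Str.strip
     let acc' := if body ≠ [] then acc ++ [(h, PySem.Str.join "" body)] else acc
     match lines.dropWhile (fun l => !(PySem.Chars.startswith l.toList ['>'])) with
     | [] => acc'
     | l :: tl => pvScan tl (PySem.Str.strip (PySem.Str.slice l (some 1) none)) acc')
    = pvScan lines h acc := by
  rw [pvScan, pvPredGt]
  cases lines.dropWhile (fun l => !(PySem.Chars.startswith l.toList ['>'])) <;>
    by_cases hb : lines.takeWhile (fun l => !(PySem.Chars.startswith l.toList ['>'])) = [] <;>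
      simp [hb]

-- B's span scan computes the reference blocks (on comment-free lines), generalized over the
-- pending stripped body lines ls and the accumulator
lemma pvScanInv (n : Nat) :
    ∀ (lines : List String), lines.length ≤ n →
    (∀ l ∈ lines, PySem.Chars.startswith l.toList ['#'] = false) →
    ∀ (h : String) (ls : List String) (acc : List (String × String)),
    acc ++ pvBlocks lines h ls
      = (let body := ls
            ++ (lines.takeWhile (fun l => !(PySem.Chars.startswith l.toList ['>']))).map PySem.Str.strip
         let acc' := if body ≠ [] then acc ++ [(h, PySem.Str.join "" body)] else acc
         match lines.dropWhile (fun l => !(PySem.Chars.startswith l.toList ['>'])) with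
         | [] => acc'
         | l :: tl => pvScan tl (PySem.Str.strip (PySem.Str.slice l (some 1) none)) acc') := by
  induction n with
  | zero =>
    intro lines hlen _ h ls acc
    rw [show lines = [] from List.length_eq_zero_iff.mp (Nat.le_zero.mp hlen)]
    by_cases hls : ls = [] <;> simp [pvBlocks, hls]
  | succ n ih =>
    intro lines hlen hnc h ls acc
    cases lines with
    | nil => by_cases hls : ls = [] <;> simp [pvBlocks, hls]
    | cons l rest =>
      have h1 : PySem.Chars.startswith l.toList ['#'] = false := hnc l (by simp)
      have hnc' : ∀ x ∈ rest, PySem.Chars.startswith x.toList ['#'] = false :=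
        fun x hx => hnc x (by simp [hx])
      have hlen' : rest.length ≤ n := by simpa using hlen
      by_cases h2 : PySem.Chars.startswith l.toList ['>'] = true
      · rw [show acc ++ pvBlocks (l :: rest) h ls
            = (if ls ≠ [] then acc ++ [(h, PySem.Str.join "" ls)] else acc)
              ++ pvBlocks rest (PySem.Str.strip (PySem.Str.slice l (some 1) none)) [] by
          rw [pvBlocks]; by_cases hls : ls = [] <;> simp [h1, h2, hls]]
        rw [ih rest hlen' hnc' _ [] _, pvShapeScan]
        simp [h2]
      · rw [show acc ++ pvBlocks (l :: rest) h ls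
            = acc ++ pvBlocks rest h (ls ++ [PySem.Str.strip l]) by
          rw [pvBlocks]; simp [h1, h2]]
        rw [ih rest hlen' hnc' h (ls ++ [PySem.Str.strip l]) acc]
        simp [h2]

-- specialize: B's scan from the initial state is the reference block list
lemma pvScanEq (lines : List String)
    (hnc : ∀ l ∈ lines, PySem.Chars.startswith l.toList ['#'] = false) :
    pvScan lines "" [] = pvBlocks lines "" [] := by
  have h1 := pvScanInv lines.length lines le_rfl hnc "" [] []
  rw [← pvShapeScan lines "" []]
  simpa using h1.symm

-- ===== VERDICT (by name: the statement is the Claim_ definition above) =====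
theorem parse_a3m_with_headers_py_spec : Claim_equal_parse_a3m_with_headers_py := by
  unfold Claim_equal_parse_a3m_with_headers_py Spec_parse_a3m_with_headers_py
  intro content _
  have hA : parse_a3m_with_headers_py content
      = pvAFin ((PySem.Str.splitlines content).foldl pvStepA ([], "", [], true)) := rfl
  rw [hA, pvAInv]
  have hnc : ∀ l ∈ (PySem.Str.splitlines content).filter
      (fun l => !(PySem.Chars.startswith l.toList ['#'])),
      PySem.Chars.startswith l.toList ['#'] = false := by
    intro l hl
    simpa using (List.of_mem_filter hl)
  show _ = parse_a3m_with_headers_py_alt content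
  unfold parse_a3m_with_headers_py_alt
  rw [pvPredHash]
  show _ = ((pvScan ((PySem.Str.splitlines content).filter
      (fun l => !(PySem.Chars.startswith l.toList ['#']))) "" []).drop 1).map
    (fun hb => (hb.1, String.ofList (hb.2.toList.filter (fun c => !(PySem.Chars.islower c)))))
  rw [pvScanEq _ hnc, pvBlocksFilter]
  rw [show pvProc = (fun hb : String × String =>
      (hb.1, String.ofList (hb.2.toList.filter (fun c => !(PySem.Chars.islower c))))) from rfl]
  simp
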